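-- pv_equiv track=rewrite | github.com/icarys29/at | scripts/docs/coverage_rules.py | _paths_by_action
-- ===== SOURCE A (Python) =====
-- from typing import Any
--
-- def _paths_by_action(changed_files: list[dict[str, Any]]) -> dict[str, list[str]]:
--     out: dict[str, list[str]] = {"created": [], "modified": [], "deleted": [], "any": []}
--     for it in changed_files[:5000]:
--         if not isinstance(it, dict):
--             continue
--         p = it.get("path")
--         a = it.get("action")
--         if not isinstance(p, str) or not p.strip():
--             continue
--         path = p.strip().replace("\\", "/")
--         out["any"].append(path)
--         if a in {"created", "modified", "deleted"}:
--             out[a].append(path)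
--     return out
-- ===== SOURCE B (Python) =====
-- def _paths_by_action(changed_files):
--     # Build one normalized index of (path, action) pairs, then distribute into buckets.
--     valid = []
--     for it in changed_files[:5000]:
--         if isinstance(it, dict):
--             p = it.get("path")
--             if isinstance(p, str) and p.strip():
--                 valid.append((p.strip().replace("\\", "/"), it.get("action")))
--     return {
--         "created": [p for p, a in valid if a == "created"],
--         "modified": [p for p, a in valid if a == "modified"],
--         "deleted": [p for p, a in valid if a == "deleted"],
--         "any": [p for p, _ in valid],
--     }
-- ===== Notes on version B (the rewrite author's own statement) =====
-- stated objective: alternative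
-- what changed: Replaces A's single interleaved loop that appends into a mutable four-bucket dict with a build-then-distribute structure: one pass builds a normalized (path, action) index, then each output bucket is produced by its own independent selection pass over that index.
import Mathlib
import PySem

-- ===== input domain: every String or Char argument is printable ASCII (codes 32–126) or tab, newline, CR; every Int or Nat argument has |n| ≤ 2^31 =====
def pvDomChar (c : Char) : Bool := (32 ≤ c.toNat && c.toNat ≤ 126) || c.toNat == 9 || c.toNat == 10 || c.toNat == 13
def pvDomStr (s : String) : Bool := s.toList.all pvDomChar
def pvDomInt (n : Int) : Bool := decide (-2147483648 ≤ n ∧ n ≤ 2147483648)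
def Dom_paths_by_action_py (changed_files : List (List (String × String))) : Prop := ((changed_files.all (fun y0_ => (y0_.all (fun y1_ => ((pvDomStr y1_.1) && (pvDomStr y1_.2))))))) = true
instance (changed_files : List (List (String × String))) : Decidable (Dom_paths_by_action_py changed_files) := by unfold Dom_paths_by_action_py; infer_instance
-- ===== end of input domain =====

-- B replaces A's interleaved append-into-dict loop by building a normalized (path, action)
-- index once and then distributing it into the four buckets by independent selection passes.


-- ===== PORT A =====
-- loop body of A: skip items without a str 'path' or with a whitespace-only path,
-- normalize the path, append to out["any"], and to out[a] when a is one of the three actions.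
-- (isinstance(it, dict) is always true under the type convention; 'not p.strip()' ⇔ stripped path is empty.)
def pbaStep (d : PySem.Dict String (List String)) (it : List (String × String)) :
    PySem.Dict String (List String) :=
  match (PySem.Dict.mk it).get? "path" with
  | none => d
  | some p =>
    if PySem.Str.strip p = "" then d
    else
      let path := PySem.Str.replace (PySem.Str.strip p) "\\" "/"
      let d1 := d.modify "any" [] (· ++ [path])
      match (PySem.Dict.mk it).get? "action" with
      | none => d1
      | some a =>
        if a = "created" ∨ a = "modified" ∨ a = "deleted" then d1.modify a [] (· ++ [path])
        else d1

def paths_by_action_py (changed_files : List (List (String × String))) : List (String × List String) :=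
  let out : PySem.Dict String (List String) :=
    ((((PySem.Dict.empty).insert "created" []).insert "modified" []).insert "deleted" []).insert "any" []
  ((PySem.List.slice changed_files none (some 5000)).foldl pbaStep out).items

-- ===== PORT B =====
-- B helper: the normalized index of (path, action-option) pairs (changed_files[:5000] with
-- a nonnegative bound is exactly List.take 5000).
def pbaValid (changed_files : List (List (String × String))) : List (String × Option String) :=
  (changed_files.take 5000).filterMap (fun it =>
    match (PySem.Dict.mk it).get? "path" with
    | none => none
    | some p =>
      if PySem.Str.strip p = "" then none
      else some (PySem.Str.replace (PySem.Str.strip p) "\\" "/", (PySem.Dict.mk it).get? "action"))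

def paths_by_action_py_alt (changed_files : List (List (String × String))) : List (String × List String) :=
  let valid := pbaValid changed_files
  [("created", (valid.filter (fun v => v.2 == some "created")).map (·.1)),
   ("modified", (valid.filter (fun v => v.2 == some "modified")).map (·.1)),
   ("deleted", (valid.filter (fun v => v.2 == some "deleted")).map (·.1)),
   ("any", valid.map (·.1))]

-- ===== PRECONDITION & SPEC =====
def Spec_paths_by_action_py (changed_files : List (List (String × String))) (out : List (String × List String)) : Prop := out = paths_by_action_py_alt changed_files
instance (changed_files : List (List (String × String))) (out : List (String × List String)) : Decidable (Spec_paths_by_action_py changed_files out) := by unfold Spec_paths_by_action_py; infer_instance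

-- ===== CLAIM (what is proved, stated in full; the proofs are below) =====
def Claim_equal_paths_by_action_py : Prop := ∀ (changed_files : List (List (String × String))), Dom_paths_by_action_py changed_files → Spec_paths_by_action_py changed_files (paths_by_action_py changed_files)

-- ===== LEMMAS AND PROOFS =====

theorem pba_getD_any (l : List (List (String × String))) (d : PySem.Dict String (List String)) :
    (l.foldl pbaStep d).getD "any" [] =
      d.getD "any" [] ++ ((l.filterMap (fun it =>
        match (PySem.Dict.mk it).get? "path" with
        | none => none
        | some p =>
          if PySem.Str.strip p = "" then none
          else some (PySem.Str.replace (PySem.Str.strip p) "\\" "/", (PySem.Dict.mk it).get? "action"))).map (·.1)) := by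
  induction l generalizing d with
  | nil => simp
  | cons it l ih =>
    rw [List.foldl_cons, ih, List.filterMap_cons]
    unfold pbaStep
    cases hp : (PySem.Dict.mk it).get? "path" with
    | none => simp
    | some p =>
      by_cases hs : PySem.Str.strip p = ""
      · simp [hs]
      · simp only [hs, if_neg hs]
        cases ha : (PySem.Dict.mk it).get? "action" with
        | none => simp [hs, PySem.Dict.getD_modify_self]
        | some a =>
          by_cases hm : a = "created" ∨ a = "modified" ∨ a = "deleted"
          · have hne : ("any" : String) ≠ a := by rcases hm with h|h|h <;> simp [h]
            simp [hs, hm, PySem.Dict.getD_modify_of_ne _ ([] : List String) _ hne,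
              PySem.Dict.getD_modify_self]
          · simp [hs, hm, PySem.Dict.getD_modify_self]

theorem pba_getD_act (c : String) (hc : c = "created" ∨ c = "modified" ∨ c = "deleted")
    (l : List (List (String × String))) (d : PySem.Dict String (List String)) :
    (l.foldl pbaStep d).getD c [] =
      d.getD c [] ++ (((l.filterMap (fun it =>
        match (PySem.Dict.mk it).get? "path" with
        | none => none
        | some p =>
          if PySem.Str.strip p = "" then none
          else some (PySem.Str.replace (PySem.Str.strip p) "\\" "/", (PySem.Dict.mk it).get? "action"))).filter (fun v => v.2 == some c)).map (·.1)) := by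
  have hcne : c ≠ "any" := by rcases hc with h|h|h <;> simp [h]
  induction l generalizing d with
  | nil => simp
  | cons it l ih =>
    rw [List.foldl_cons, ih, List.filterMap_cons]
    unfold pbaStep
    cases hp : (PySem.Dict.mk it).get? "path" with
    | none => simp
    | some p =>
      by_cases hs : PySem.Str.strip p = ""
      · simp [hs]
      · simp only [hs, if_neg hs]
        cases ha : (PySem.Dict.mk it).get? "action" with
        | none => simp [hs, PySem.Dict.getD_modify_of_ne _ ([] : List String) _ hcne]
        | some a =>
          by_cases hm : a = "created" ∨ a = "modified" ∨ a = "deleted"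
          · by_cases hac : a = c
            · subst hac
              simp [hs, hm, PySem.Dict.getD_modify_self,
                PySem.Dict.getD_modify_of_ne _ ([] : List String) _ hcne]
            · simp [hs, hm, Ne.symm hac, hac,
                PySem.Dict.getD_modify_of_ne _ ([] : List String) _ hcne,
                PySem.Dict.getD_modify_of_ne _ ([] : List String) _ (Ne.symm hac)]
          · have hac : a ≠ c := by rintro rfl; exact hm hc
            simp [hs, hm, hac,
              PySem.Dict.getD_modify_of_ne _ ([] : List String) _ hcne]

theorem pba_keys (l : List (List (String × String))) (d : PySem.Dict String (List String))
    (h : "created" ∈ d.keys ∧ "modified" ∈ d.keys ∧ "deleted" ∈ d.keys ∧ "any" ∈ d.keys) :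
    (l.foldl pbaStep d).keys = d.keys := by
  induction l generalizing d with
  | nil => rfl
  | cons it l ih =>
    obtain ⟨h1, h2, h3, h4⟩ := h
    have hkeys : (pbaStep d it).keys = d.keys := by
      have hany : ∀ f : List String → List String, (d.modify "any" [] f).keys = d.keys := by
        intro f
        rw [PySem.Dict.keys_modify, PySem.Dict.keys_insert_of_contains]
        exact (PySem.Dict.contains_iff_mem_keys d "any").mpr h4
      unfold pbaStep
      cases hp : (PySem.Dict.mk it).get? "path" with
      | none => rfl
      | some p =>
        dsimp only
        by_cases hs : PySem.Str.strip p = ""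
        · simp [hs]
        · rw [if_neg hs]
          cases ha : (PySem.Dict.mk it).get? "action" with
          | none => exact hany _
          | some a =>
            dsimp only
            by_cases hm : a = "created" ∨ a = "modified" ∨ a = "deleted"
            · rw [if_pos hm, PySem.Dict.keys_modify, PySem.Dict.keys_insert_of_contains, hany]
              rw [PySem.Dict.contains_iff_mem_keys, hany]
              rcases hm with h|h|h <;> simp [h, h1, h2, h3]
            · rw [if_neg hm]; exact hany _
    rw [List.foldl_cons, ih _ (by rw [hkeys]; exact ⟨h1, h2, h3, h4⟩), hkeys]

-- ===== VERDICT (by name: the statement is the Claim_ definition above) =====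
theorem paths_by_action_py_spec : Claim_equal_paths_by_action_py := by
  intro cf _
  unfold Spec_paths_by_action_py paths_by_action_py paths_by_action_py_alt pbaValid
  rw [show ((5000 : Int)) = ((5000 : Nat) : Int) by norm_num, PySem.List.slice_to_natCast]
  set D0 : PySem.Dict String (List String) :=
    ((((PySem.Dict.empty).insert "created" []).insert "modified" []).insert "deleted" []).insert "any" [] with hD0
  have hk0 : D0.keys = ["created", "modified", "deleted", "any"] := by decide
  have hmem : "created" ∈ D0.keys ∧ "modified" ∈ D0.keys ∧ "deleted" ∈ D0.keys ∧ "any" ∈ D0.keys := by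
    rw [hk0]; simp
  have hkeys := pba_keys (cf.take 5000) D0 hmem
  have hnd : ((cf.take 5000).foldl pbaStep D0).keys.Nodup := by
    rw [hkeys, hk0]; decide
  rw [PySem.Dict.items_eq_map_keys _ hnd ([] : List String), hkeys, hk0]
  have e0 : D0.getD "created" [] = [] := by decide
  have e1 : D0.getD "modified" [] = [] := by decide
  have e2 : D0.getD "deleted" [] = [] := by decide
  have e3 : D0.getD "any" [] = [] := by decide
  simp only [List.map_cons, List.map_nil,
    pba_getD_act "created" (by tauto) (cf.take 5000) D0,
    pba_getD_act "modified" (by tauto) (cf.take 5000) D0,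
    pba_getD_act "deleted" (by tauto) (cf.take 5000) D0,
    pba_getD_any (cf.take 5000) D0, e0, e1, e2, e3, List.nil_append]
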